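-- pv_equiv track=rewrite | github.com/bugbuger97/Baejoon_sol | 백준/Bronze/10250. ACM 호텔/ACM 호텔.py | Room_number
-- ===== SOURCE A (Python) =====
-- def Room_number(H,W,N) -> str:
--   matrix = []
--   temp = []
--   for i in range(W):
--     for j in range(H):
--       if i+1 < 10:
--         temp.append(str(j+1)+'0'+str(i+1))
--       else:
--         temp.append(str(j+1)+str(i+1))
--     matrix+=temp
--     temp = []
--   return matrix[N-1]
-- ===== SOURCE B (Python) =====
-- def Room_number(H, W, N):
--     floor = (N - 1) % H + 1
--     col = (N - 1) // H + 1
--     if col < 10: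
--         return str(floor) + '0' + str(col)
--     return str(floor) + str(col)
-- ===== Notes on version B (the rewrite author's own statement) =====
-- stated objective: faster
-- what changed: Replaces the O(H*W) construction of the whole room matrix followed by an index lookup with the closed-form O(1) divmod formula floor=(N-1)%H+1, col=(N-1)//H+1.
-- intended difference: For N <= 0 (with N still in Python's accepted index range) A returns a room via Python's accidental negative-index wraparound of matrix[N-1] (e.g. N=0 yields the last room '202' for H=W=2), while B's formula returns the value of extending the floor/column arithmetic ('200' there); the wraparound is an artefact of A's list lookup, not an intended behaviour, so B's direct formula value is the natural one. — e.g. on Room_number(2, 2, 0): A returns "202", B returns "200"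
import Mathlib
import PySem

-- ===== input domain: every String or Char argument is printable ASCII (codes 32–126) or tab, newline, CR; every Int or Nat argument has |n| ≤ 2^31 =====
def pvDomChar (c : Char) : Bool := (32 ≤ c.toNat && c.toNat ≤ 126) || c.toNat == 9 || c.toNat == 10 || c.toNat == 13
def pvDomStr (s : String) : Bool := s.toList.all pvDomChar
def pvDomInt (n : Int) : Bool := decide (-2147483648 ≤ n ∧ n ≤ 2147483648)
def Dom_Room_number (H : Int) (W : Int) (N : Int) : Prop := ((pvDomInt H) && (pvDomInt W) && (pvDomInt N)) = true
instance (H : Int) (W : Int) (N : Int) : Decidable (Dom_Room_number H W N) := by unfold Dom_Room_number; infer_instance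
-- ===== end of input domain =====

-- B replaces A's O(H*W) matrix construction + index lookup by the closed-form divmod formula (O(1));
-- for N ≤ 0 (A's accidental negative-index wraparound) B's formula value differs, see D_ below.

-- ===== PORT A =====
def Room_number (H : Int) (W : Int) (N : Int) : String :=
  let matrix : List String :=
    (PySem.List.pyRange 0 W 1).foldl (fun matrix i =>
      let temp : List String :=
        (PySem.List.pyRange 0 H 1).foldl (fun temp j =>
          temp ++ [if i + 1 < 10 then
                     PySem.Int.toStr (j + 1) ++ "0" ++ PySem.Int.toStr (i + 1)
                   else
                     PySem.Int.toStr (j + 1) ++ PySem.Int.toStr (i + 1)]) []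
      matrix ++ temp) []
  (PySem.List.pyGet? matrix (N - 1)).getD ""   -- none = IndexError, excluded by Pre_

-- ===== PORT B =====
def Room_number_alt (H : Int) (W : Int) (N : Int) : String :=
  let floor := PySem.Int.mod (N - 1) H + 1
  let col := PySem.Int.floordiv (N - 1) H + 1
  if col < 10 then PySem.Int.toStr floor ++ "0" ++ PySem.Int.toStr col
  else PySem.Int.toStr floor ++ PySem.Int.toStr col

-- ===== PRECONDITION & SPEC =====
-- Pre_ is exactly the set of inputs on which A returns normally: positive dimensions and a
-- lookup index N-1 inside Python's accepted index range [-H*W, H*W); outside it A raises IndexError.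
def Pre_Room_number (H : Int) (W : Int) (N : Int) : Prop := 1 ≤ H ∧ 1 ≤ W ∧ 1 - H * W ≤ N ∧ N ≤ H * W
instance (H : Int) (W : Int) (N : Int) : Decidable (Pre_Room_number H W N) := by
  unfold Pre_Room_number; infer_instance
def pvWitness_Room_number : Int × Int × Int := (2, 3, 4)

-- For N ≤ 0 A returns a room via Python's accidental negative-index wraparound of matrix[N-1]
-- (e.g. the last room "202" at H=W=2, N=0), while B returns the direct formula value ("200" there);
-- the wraparound is an artefact of A's list lookup, so B's value is the intended one.
def D_Room_number (H : Int) (W : Int) (N : Int) : Prop := N ≤ 0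
instance (H : Int) (W : Int) (N : Int) : Decidable (D_Room_number H W N) := by
  unfold D_Room_number; infer_instance

def Spec_Room_number (H : Int) (W : Int) (N : Int) (out : String) : Prop :=
  ¬ D_Room_number H W N → out = Room_number_alt H W N
instance (H : Int) (W : Int) (N : Int) (out : String) : Decidable (Spec_Room_number H W N out) := by
  unfold Spec_Room_number; infer_instance

def pvDiffWitness_Room_number : Int × Int × Int := (2, 2, 0)
def pvDiffWitnessOut_Room_number : String × String := ("202", "200")

-- ===== CLAIM (what is proved, stated in full; the proofs are below) =====
def Claim_unchanged_Room_number : Prop := ∀ (H : Int) (W : Int) (N : Int), Dom_Room_number H W N → Pre_Room_number H W N → Spec_Room_number H W N (Room_number H W N)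
def Claim_changed_Room_number : Prop := Dom_Room_number (pvDiffWitness_Room_number.1) (pvDiffWitness_Room_number.2.1) (pvDiffWitness_Room_number.2.2) ∧ Pre_Room_number (pvDiffWitness_Room_number.1) (pvDiffWitness_Room_number.2.1) (pvDiffWitness_Room_number.2.2) ∧ D_Room_number (pvDiffWitness_Room_number.1) (pvDiffWitness_Room_number.2.1) (pvDiffWitness_Room_number.2.2) ∧ Room_number (pvDiffWitness_Room_number.1) (pvDiffWitness_Room_number.2.1) (pvDiffWitness_Room_number.2.2) = pvDiffWitnessOut_Room_number.1 ∧ Room_number_alt (pvDiffWitness_Room_number.1) (pvDiffWitness_Room_number.2.1) (pvDiffWitness_Room_number.2.2) = pvDiffWitnessOut_Room_number.2 ∧ pvDiffWitnessOut_Room_number.1 ≠ pvDiffWitnessOut_Room_number.2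

-- ===== LEMMAS AND PROOFS =====

-- A's nested append-loops build exactly the flatMap of the rows over the columns.
lemma pvMatrix_char (f : Int → Int → String) (h w : Nat) :
    (PySem.List.pyRange 0 (w : Int) 1).foldl (fun m i =>
        m ++ (PySem.List.pyRange 0 (h : Int) 1).foldl (fun t j => t ++ [f j i]) []) []
    = (List.range w).flatMap (fun i : Nat => (List.range h).map (fun j : Nat => f (j : Int) (i : Int))) := by
  rw [PySem.List.pyRange_zero_nat, PySem.List.pyRange_zero_nat]
  simp only [PySem.List.foldl_append_singleton_eq_map, List.nil_append,
    PySem.List.foldl_append_eq_flatMap, List.flatMap_map, List.map_map, Function.comp_def]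

lemma pvFlat_len {β : Type} (g : Nat → Nat → β) (h w : Nat) :
    ((List.range w).flatMap (fun i => (List.range h).map (fun j => g j i))).length = w * h := by
  induction w with
  | zero => simp
  | succ w ih =>
    rw [List.range_succ, List.flatMap_append]
    simp [ih, Nat.succ_mul]

lemma pvFlat_get {β : Type} (g : Nat → Nat → β) (h w k : Nat) (hk : k < w * h) :
    ((List.range w).flatMap (fun i => (List.range h).map (fun j => g j i)))[k]?
      = some (g (k % h) (k / h)) := by
  induction w with
  | zero => omega
  | succ w ih =>
    have hsw : (w + 1) * h = w * h + h := by ring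
    by_cases hlt : k < w * h
    · rw [List.range_succ, List.flatMap_append,
        List.getElem?_append_left (by rw [pvFlat_len]; exact hlt)]
      exact ih hlt
    · have hh : 0 < h := by omega
      have hr : k - w * h < h := by omega
      have hkeq : k = (k - w * h) + w * h := by omega
      rw [List.range_succ, List.flatMap_append,
        List.getElem?_append_right (by rw [pvFlat_len]; omega), pvFlat_len]
      simp only [List.flatMap_cons, List.flatMap_nil, List.append_nil]
      rw [List.getElem?_map, List.getElem?_range hr]
      have hmod : k % h = k - w * h := by
        conv_lhs => rw [hkeq]
        rw [Nat.add_mul_mod_self_right, Nat.mod_eq_of_lt hr]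
      have hdiv : k / h = w := by
        conv_lhs => rw [hkeq]
        rw [Nat.add_mul_div_right _ _ hh, Nat.div_eq_of_lt hr, Nat.zero_add]
      rw [hmod, hdiv]
      rfl

lemma pvMod_cast (k h : Nat) : PySem.Int.mod (k : Int) (h : Int) = ((k % h : Nat) : Int) := by
  unfold PySem.Int.mod
  rw [Int.fmod_eq_emod, if_pos (Or.inl (by positivity))]
  push_cast; ring

lemma pvDiv_cast (k h : Nat) : PySem.Int.floordiv (k : Int) (h : Int) = ((k / h : Nat) : Int) := by
  unfold PySem.Int.floordiv
  rw [Int.fdiv_eq_ediv, if_pos (Or.inl (by positivity))]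
  push_cast; ring

-- ===== VERDICT (by name: the statement is the Claim_ definition above) =====
theorem Room_number_spec : Claim_unchanged_Room_number := by
  intro H W N _ hPre hND
  obtain ⟨hH, hW1, hNlo, hNhi⟩ := hPre
  have hN1 : 1 ≤ N := by unfold D_Room_number at hND; omega
  have hH0 : (0 : Int) ≤ H := by omega
  have hW0 : (0 : Int) ≤ W := by omega
  have hHc : H = ((H.toNat : Nat) : Int) := (Int.toNat_of_nonneg hH0).symm
  have hWc : W = ((W.toNat : Nat) : Int) := (Int.toNat_of_nonneg hW0).symm
  set k : Nat := (N - 1).toNat with hkdef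
  have hkc : N - 1 = (k : Int) := (Int.toNat_of_nonneg (by omega)).symm
  have h2 : ((W.toNat * H.toNat : Nat) : Int) = H * W := by
    push_cast
    rw [Int.toNat_of_nonneg hW0, Int.toNat_of_nonneg hH0]
    ring
  have hkbound : k < W.toNat * H.toNat := by
    have : (k : Int) < ((W.toNat * H.toNat : Nat) : Int) := by omega
    exact_mod_cast this
  show Room_number H W N = Room_number_alt H W N
  simp only [Room_number, Room_number_alt]
  rw [hkc, hHc, hWc, pvMatrix_char, pvMod_cast, pvDiv_cast,
    PySem.List.pyGet?_of_nonneg _ (by positivity),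
    Int.toNat_natCast, pvFlat_get _ _ _ _ hkbound, Option.getD_some]

theorem Room_number_changed : Claim_changed_Room_number := by
  unfold Claim_changed_Room_number; decide
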